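-- pv_equiv track=rewrite | github.com/dikoko/practice | 6 Trees/6-13_bst_orders.py | bst_pre_to_inorder
-- ===== SOURCE A (Python) =====
-- class BTNode(object):
--     def __init__(self,val):
--         self.val = val
--         self.left = None
--         self.right = None
--
-- def bst_pre_to_inorder(pre_list):
--     if not pre_list: return
--
--     len_pre = len(pre_list)
--
--     def _build(low, high):
--         if low > high:
--             return None
--
--         sub_root = BTNode(pre_list[low])
--         for i in range(low+1, high+1):
--             if pre_list[i] >= sub_root.val:  ########
--                 break
--         else:
--             i = high + 1
--
--         sub_root.left = _build(low+1, i-1)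
--         sub_root.right = _build(i, high)
--
--         return sub_root
--
--     root = _build(0, len_pre-1)
--
--     out_list = []
--     node = root
--     wstack = []
--     while node or wstack:
--         if node:
--             wstack.append(node)
--             node = node.left
--         else:
--             node = wstack.pop()
--             out_list.append(node.val)
--             node = node.right
--     return out_list
-- ===== SOURCE B (Python) =====
-- def bst_pre_to_inorder(pre_list):
--     if not pre_list:
--         return None
--     out = []
--     stack = []
--     for y in pre_list:
--         while stack and stack[-1] <= y:
--             out.append(stack.pop())
--         stack.append(y)
--     while stack:
--         out.append(stack.pop())
--     return out
-- ===== Notes on version B (the rewrite author's own statement) =====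
-- stated objective: faster
-- what changed: B replaces A's two-phase O(n^2) approach (recursively building an explicit BST by scanning for the split index, then an iterative stack traversal) with a single O(n) monotonic-stack pass over the preorder list that emits the inorder sequence directly.
import Mathlib
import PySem

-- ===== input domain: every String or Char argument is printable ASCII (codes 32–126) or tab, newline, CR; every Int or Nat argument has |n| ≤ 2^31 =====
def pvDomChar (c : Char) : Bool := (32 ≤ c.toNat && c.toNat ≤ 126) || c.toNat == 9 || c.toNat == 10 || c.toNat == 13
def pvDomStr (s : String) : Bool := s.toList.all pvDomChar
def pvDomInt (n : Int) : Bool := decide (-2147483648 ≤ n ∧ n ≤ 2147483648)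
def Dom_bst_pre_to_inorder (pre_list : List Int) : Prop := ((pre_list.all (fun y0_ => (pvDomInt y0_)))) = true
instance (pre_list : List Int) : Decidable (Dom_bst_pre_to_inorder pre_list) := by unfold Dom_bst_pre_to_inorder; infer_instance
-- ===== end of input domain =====

-- B replaces A's O(n^2) build-a-tree-then-traverse with a one-pass monotonic-stack
-- scan producing the same inorder sequence directly (objective: faster).

-- ===== PORT A =====
-- binary tree with value, left, right (BTNode; BT.nil = Python None)
inductive BT : Type
  | nil : BT
  | node : Int → BT → BT → BT
deriving DecidableEq, Repr

def BT.size : BT → Nat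
  | .nil => 0
  | .node _ l r => 1 + l.size + r.size

-- the 'for i in range(low+1, high+1): if pre_list[i] >= sub_root.val: break / else: i = high+1'
-- search, as a find? over the ported range (none = the loop's 'else' arm)
def pvFindSplit (pre_list : List Int) (v : Int) (i high : Int) : Int :=
  ((PySem.List.pyRange i (high + 1)).find?
    (fun j => match PySem.List.pyGet? pre_list j with
      | some a => decide (a ≥ v)
      | none => true)).getD (high + 1)  -- none from pyGet? = IndexError in Python; totalization guard

-- _build(low, high); the extra Nat is fuel bounding the recursion depth: it only makes
-- the recursion total and the caller passes enough of it for every reachable call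
def pvBuildF (pre_list : List Int) : Nat → Int → Int → BT
  | 0, _, _ => .nil  -- fuel guard, never reached with the fuel bst_pre_to_inorder supplies
  | fuel + 1, low, high =>
    if low > high then .nil
    else match PySem.List.pyGet? pre_list low with
      | none => .nil  -- unreachable on A's actual calls (would be IndexError); totalization guard
      | some v =>
        let i := pvFindSplit pre_list v (low + 1) high
        .node v (pvBuildF pre_list fuel (low + 1) (i - 1)) (pvBuildF pre_list fuel i high)

-- the iterative inorder 'while node or wstack' loop (stack top at head), fuel-guarded likewise
def pvLoopF : Nat → BT → List BT → List Int → List Int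
  | 0, _, _, out_list => out_list  -- fuel guard, never reached with the fuel supplied below
  | fuel + 1, t, wstack, out_list =>
    match t with
    | .node v l r => pvLoopF fuel l (.node v l r :: wstack) out_list
    | .nil =>
      match wstack with
      | [] => out_list
      | .node v _ r :: st => pvLoopF fuel r st (out_list ++ [v])
      | .nil :: _ => out_list  -- unreachable: only nodes are pushed (Python would crash on None.val)

def bst_pre_to_inorder (pre_list : List Int) : Option (List Int) :=
  if pre_list = [] then none
  else
    let len_pre : Int := pre_list.length
    let root := pvBuildF pre_list (pre_list.length + 1) 0 (len_pre - 1)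
    some (pvLoopF (2 * root.size + 1) root [] [])

-- ===== PORT B =====
-- 'while stack and stack[-1] <= y: out.append(stack.pop())'  (stack top at head)
def pvPop (y : Int) (stack out : List Int) : List Int × List Int :=
  match stack with
  | [] => (out, [])
  | s :: st => if s ≤ y then pvPop y st (out ++ [s]) else (out, s :: st)

def pvRun (xs out stack : List Int) : List Int :=
  match xs with
  | [] => out ++ stack  -- final 'while stack: out.append(stack.pop())'
  | y :: ys =>
    let p := pvPop y stack out
    pvRun ys p.1 (y :: p.2)

def bst_pre_to_inorder_alt (pre_list : List Int) : Option (List Int) :=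
  if pre_list = [] then none
  else some (pvRun pre_list [] [])

-- ===== PRECONDITION & SPEC =====
def Spec_bst_pre_to_inorder (pre_list : List Int) (out : Option (List Int)) : Prop := out = bst_pre_to_inorder_alt pre_list
instance (pre_list : List Int) (out : Option (List Int)) : Decidable (Spec_bst_pre_to_inorder pre_list out) := by unfold Spec_bst_pre_to_inorder; infer_instance

-- ===== CLAIM (what is proved, stated in full; the proofs are below) =====
def Claim_equal_bst_pre_to_inorder : Prop := ∀ (pre_list : List Int), Dom_bst_pre_to_inorder pre_list → Spec_bst_pre_to_inorder pre_list (bst_pre_to_inorder pre_list)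

-- ===== LEMMAS AND PROOFS =====

-- recursive characterisation of the inorder sequence both programs compute
def iseq : List Int → List Int
  | [] => []
  | x :: rest =>
      iseq (rest.takeWhile (fun a => a < x)) ++ x :: iseq (rest.dropWhile (fun a => a < x))
termination_by l => l.length
decreasing_by
  · have := (List.takeWhile_prefix (fun a => decide (a < x))).length_le (l₂ := rest)
    simp only [List.length_cons]
    omega
  · have := List.length_dropWhile_le (fun a => decide (a < x)) rest
    simp only [List.length_cons]
    omega

theorem iseq_nil : iseq [] = [] := by simp [iseq]

theorem iseq_cons (x : Int) (rest : List Int) :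
    iseq (x :: rest) = iseq (rest.takeWhile (fun a => a < x)) ++ x :: iseq (rest.dropWhile (fun a => a < x)) := by
  rw [iseq]

-- ---------- B side ----------

def gfun : List Int → List Int → List Int
  | [], xs => iseq xs
  | s :: st, xs => iseq (xs.takeWhile (fun a => a < s)) ++ s :: gfun st (xs.dropWhile (fun a => a < s))

theorem gfun_nil (st : List Int) : gfun st [] = st := by
  induction st with
  | nil => simp [gfun, iseq_nil]
  | cons s st ih => simp [gfun, iseq_nil, ih]

theorem tw_tw (y s : Int) (hys : y ≤ s) (l : List Int) :
    (l.takeWhile (fun a => a < s)).takeWhile (fun a => a < y) = l.takeWhile (fun a => a < y) := by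
  induction l with
  | nil => simp
  | cons a l ih =>
    by_cases h1 : a < y
    · have h2 : a < s := by omega
      simp [h1, h2, ih]
    · by_cases h2 : a < s <;> simp [h1, h2]

theorem dw_tw (y s : Int) (hys : y ≤ s) (l : List Int) :
    (l.takeWhile (fun a => a < s)).dropWhile (fun a => a < y)
      = (l.dropWhile (fun a => a < y)).takeWhile (fun a => a < s) := by
  induction l with
  | nil => simp
  | cons a l ih =>
    by_cases h1 : a < y
    · have h2 : a < s := by omega
      simp [h1, h2, ih]
    · by_cases h2 : a < s <;> simp [h1, h2]

theorem dw_dw (y s : Int) (hys : y ≤ s) (l : List Int) :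
    (l.dropWhile (fun a => a < y)).dropWhile (fun a => a < s) = l.dropWhile (fun a => a < s) := by
  induction l with
  | nil => simp
  | cons a l ih =>
    by_cases h1 : a < y
    · have h2 : a < s := by omega
      simp [h1, h2, ih]
    · simp [List.dropWhile_cons, h1]

theorem gfun_step (y : Int) (ys : List Int) (st : List Int) :
    gfun st (y :: ys)
      = st.takeWhile (fun s => s ≤ y) ++ gfun (y :: st.dropWhile (fun s => s ≤ y)) ys := by
  induction st with
  | nil =>
    simp [gfun, iseq_cons]
  | cons s st ih =>
    by_cases h : s ≤ y
    · have hny : ¬ y < s := by omega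
      simp [gfun, iseq_nil, h, hny, ih]
    · have hys : y < s := by omega
      simp only [gfun]
      rw [show (y :: ys).takeWhile (fun a => decide (a < s)) = y :: ys.takeWhile (fun a => decide (a < s)) from by simp [hys],
        show (y :: ys).dropWhile (fun a => decide (a < s)) = (ys.dropWhile (fun a => decide (a < y))).dropWhile (fun a => decide (a < s)) from by simp [hys, dw_dw y s hys.le],
        show (s :: st).takeWhile (fun t => decide (t ≤ y)) = [] from by simp [h],
        show (s :: st).dropWhile (fun t => decide (t ≤ y)) = s :: st from by simp [h],
        iseq_cons y (ys.takeWhile (fun a => decide (a < s))),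
        tw_tw y s hys.le, dw_tw y s hys.le]
      simp [gfun]

theorem pvPop_eq (y : Int) (stack out : List Int) :
    pvPop y stack out = (out ++ stack.takeWhile (fun s => s ≤ y), stack.dropWhile (fun s => s ≤ y)) := by
  induction stack generalizing out with
  | nil => simp [pvPop]
  | cons s st ih =>
    by_cases h : s ≤ y
    · simp [pvPop, h, ih]
    · simp [pvPop, h]

theorem pvRun_eq (xs : List Int) (out stack : List Int) :
    pvRun xs out stack = out ++ gfun stack xs := by
  induction xs generalizing out stack with
  | nil => simp [pvRun, gfun_nil]
  | cons y ys ih =>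
    simp only [pvRun, pvPop_eq, ih]
    rw [gfun_step]
    simp

-- ---------- A side ----------

def inorderRec : BT → List Int
  | .nil => []
  | .node v l r => inorderRec l ++ v :: inorderRec r

def stkContrib : BT → List Int
  | .nil => []
  | .node v _ r => v :: inorderRec r

def pvStkWeight : BT → Nat
  | .nil => 1
  | .node _ _ r => 2 * r.size + 1

theorem pvLoopF_eq (fuel : Nat) (t : BT) (wstack : List BT) (out : List Int)
    (h : ∀ u ∈ wstack, u ≠ BT.nil)
    (hm : 2 * t.size + (wstack.map pvStkWeight).sum < fuel) :
    pvLoopF fuel t wstack out = out ++ inorderRec t ++ (wstack.map stkContrib).flatten := by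
  induction fuel generalizing t wstack out with
  | zero => omega
  | succ fuel ih =>
    match t with
    | .node v l r =>
      simp only [pvLoopF]
      rw [ih l (.node v l r :: wstack) out]
      · simp [inorderRec, stkContrib]
      · intro u hu
        rcases List.mem_cons.mp hu with h1 | h1
        · subst h1; simp
        · exact h u h1
      · simp only [List.map_cons, List.sum_cons, pvStkWeight] at hm ⊢
        simp only [BT.size] at hm
        omega
    | .nil =>
      match wstack with
      | [] => simp [pvLoopF, inorderRec]
      | .node v l' r :: st =>
        simp only [pvLoopF]
        rw [ih r st (out ++ [v])]
        · simp [inorderRec, stkContrib]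
        · intro u hu; exact h u (by simp [hu])
        · simp only [List.map_cons, List.sum_cons, pvStkWeight, BT.size] at hm ⊢
          omega
      | .nil :: st => exact absurd rfl (h BT.nil (by simp))

theorem pvFindSplit_eq (pre_list : List Int) (v : Int) (i high : Int)
    (h0 : 0 ≤ i) (h1 : i ≤ high + 1) (h2 : high < (pre_list.length : Int)) :
    pvFindSplit pre_list v i high
      = i + (((pre_list.drop i.toNat).take (high + 1 - i).toNat).takeWhile (fun a => a < v)).length := by
  by_cases hih : i > high
  · have ht0 : (high + 1 - i).toNat = 0 := by omega
    rw [pvFindSplit, PySem.List.pyRange_one_eq_nil (by omega), ht0]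
    simp only [List.find?_nil, Option.getD_none, List.take_zero, List.takeWhile_nil,
      List.length_nil, Nat.cast_zero, add_zero]
    omega
  · have hlt : i.toNat < pre_list.length := by omega
    have hget : PySem.List.pyGet? pre_list i = some pre_list[i.toNat] :=
      PySem.List.pyGet?_eq_some_getElem pre_list h0 (by omega)
    have hdrop : pre_list.drop i.toNat = pre_list[i.toNat] :: pre_list.drop (i.toNat + 1) :=
      List.drop_eq_getElem_cons hlt
    have htk : (high + 1 - i).toNat = (high - i).toNat + 1 := by omega
    rw [pvFindSplit, PySem.List.pyRange_one_cons (by omega), List.find?_cons, hget]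
    by_cases hv : pre_list[i.toNat] ≥ v
    · simp only [hv, decide_true, Option.getD_some, hdrop, htk,
        List.take_succ_cons, List.takeWhile_cons, decide_eq_true_eq]
      have hnv : ¬ (pre_list[i.toNat] < v) := by omega
      simp [hnv]
    · have hvv : pre_list[i.toNat] < v := by omega
      have ih := pvFindSplit_eq pre_list v (i + 1) high (by omega) (by omega) h2
      rw [pvFindSplit] at ih
      have hnat : (i + 1).toNat = i.toNat + 1 := by omega
      have hnat2 : (high + 1 - (i + 1)).toNat = (high - i).toNat := by omega
      rw [hnat, hnat2] at ih
      simp only [show decide (pre_list[i.toNat] ≥ v) = false from by simp; omega, ih,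
        hdrop, htk, List.take_succ_cons, List.takeWhile_cons, hvv, decide_true, if_true,
        List.length_cons]
      push_cast
      ring
termination_by (high + 1 - i).toNat
decreasing_by omega

theorem take_takeWhile_length {p : Int → Bool} (l : List Int) :
    l.take (l.takeWhile p).length = l.takeWhile p := by
  induction l with
  | nil => simp
  | cons a l ih =>
    by_cases h : p a
    · simp [h, ih]
    · simp [h]

theorem drop_takeWhile_length {p : Int → Bool} (l : List Int) :
    l.drop (l.takeWhile p).length = l.dropWhile p := by
  induction l with
  | nil => simp
  | cons a l ih =>
    by_cases h : p a
    · simp [h, ih]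
    · simp [h]

theorem pvBuildF_eq (pre_list : List Int) (fuel : Nat) (low high : Int)
    (h0 : 0 ≤ low) (h2 : high < (pre_list.length : Int))
    (hf : (high + 1 - low).toNat < fuel) :
    inorderRec (pvBuildF pre_list fuel low high)
      = iseq ((pre_list.drop low.toNat).take (high + 1 - low).toNat) := by
  induction fuel generalizing low high with
  | zero => omega
  | succ fuel ih =>
    by_cases hlh : low > high
    · have ht0 : (high + 1 - low).toNat = 0 := by omega
      simp only [pvBuildF]
      rw [if_pos hlh, ht0]
      simp [inorderRec, iseq_nil]
    · have hlt : low.toNat < pre_list.length := by omega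
      have hget : PySem.List.pyGet? pre_list low = some pre_list[low.toNat] :=
        PySem.List.pyGet?_eq_some_getElem pre_list h0 (by omega)
      obtain ⟨v, hv⟩ : ∃ v, pre_list[low.toNat] = v := ⟨_, rfl⟩
      rw [hv] at hget
      have hdrop : pre_list.drop low.toNat = v :: pre_list.drop (low.toNat + 1) := by
        rw [← hv]; exact List.drop_eq_getElem_cons hlt
      obtain ⟨rest, hrest⟩ :
          ∃ r, (pre_list.drop (low.toNat + 1)).take (high - low).toNat = r := ⟨_, rfl⟩
      obtain ⟨k, hk⟩ : ∃ k, (rest.takeWhile (fun a => decide (a < v))).length = k := ⟨_, rfl⟩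
      have hrl : rest.length ≤ (high - low).toNat := by
        rw [← hrest]; exact List.length_take_le _ _
      have hkr : k ≤ rest.length := by
        rw [← hk]; exact (List.takeWhile_prefix _).length_le
      have hfs : pvFindSplit pre_list v (low + 1) high = low + 1 + (k : Int) := by
        rw [pvFindSplit_eq pre_list v (low + 1) high (by omega) (by omega) h2,
          show (low + 1).toNat = low.toNat + 1 from by omega,
          show (high + 1 - (low + 1)).toNat = (high - low).toNat from by omega,
          hrest, hk]
      have hseg : (pre_list.drop low.toNat).take (high + 1 - low).toNat = v :: rest := by
        rw [hdrop, show (high + 1 - low).toNat = (high - low).toNat + 1 from by omega,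
          List.take_succ_cons, hrest]
      have hleft : inorderRec (pvBuildF pre_list fuel (low + 1) (low + 1 + (k : Int) - 1))
          = iseq (rest.takeWhile (fun a => decide (a < v))) := by
        rw [ih (low + 1) (low + 1 + (k : Int) - 1) (by omega) (by omega) (by omega),
          show (low + 1).toNat = low.toNat + 1 from by omega,
          show (low + 1 + (k : Int) - 1 + 1 - (low + 1)).toNat = k from by omega]
        have e1 : rest.take k = rest.takeWhile (fun a => decide (a < v)) := by
          rw [← hk]; exact take_takeWhile_length rest
        have e2 : (pre_list.drop (low.toNat + 1)).take k = rest.take k := by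
          rw [← hrest, List.take_take, Nat.min_eq_left (by omega)]
        rw [e2, e1]
      have hright : inorderRec (pvBuildF pre_list fuel (low + 1 + (k : Int)) high)
          = iseq (rest.dropWhile (fun a => decide (a < v))) := by
        rw [ih (low + 1 + (k : Int)) high (by omega) h2 (by omega),
          show (low + 1 + (k : Int)).toNat = low.toNat + 1 + k from by omega,
          show (high + 1 - (low + 1 + (k : Int))).toNat = (high - low).toNat - k from by omega]
        have e1 : rest.drop k = rest.dropWhile (fun a => decide (a < v)) := by
          rw [← hk]; exact drop_takeWhile_length rest
        have e2 : (pre_list.drop (low.toNat + 1 + k)).take ((high - low).toNat - k)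
            = rest.drop k := by
          rw [← hrest, List.drop_take, List.drop_drop]
        rw [e2, e1]
      simp only [pvBuildF]
      rw [if_neg hlh, hget]
      simp only [hfs]
      simp only [inorderRec]
      rw [hleft, hright, hseg, iseq_cons]

-- ===== VERDICT (by name: the statement is the Claim_ definition above) =====
theorem bst_pre_to_inorder_spec : Claim_equal_bst_pre_to_inorder := by
  intro pre_list _
  unfold Spec_bst_pre_to_inorder bst_pre_to_inorder bst_pre_to_inorder_alt
  by_cases hnil : pre_list = []
  · simp [hnil]
  · simp only [hnil, if_false]
    congr 1
    rw [pvRun_eq, pvLoopF_eq _ _ _ _ (by simp) (by simp),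
      pvBuildF_eq pre_list (pre_list.length + 1) 0 ((pre_list.length : Int) - 1) (by omega)
        (by omega) (by omega)]
    simp [gfun]
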